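-- pv_equiv track=rewrite | github.com/udayagirisupraja/DjangoWebProject1 | DjangoWebProject1/app/py_Files/ION_Messaging_Service.py | getmsg_gen_Lists
-- ===== SOURCE A (Python) =====
-- def getmsg_gen_Lists(msg_gen_KeyWords):
--     msg_gen_catList = [[], [], [], [], [], []]
--     for keyWords in msg_gen_KeyWords:
--         if any ('provisioningentitlementhelper' in s for s in keyWords):
--             msg_gen_catList[0].append(keyWords)
--         elif any ('baseruntimeentitlementhelper' in s for s in keyWords):
--             msg_gen_catList[1].append(keyWords)
--         elif any ('messagingexceptionmapper' in s for s in keyWords):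
--             msg_gen_catList[2].append(keyWords)
--         elif any ('messagingserviceexception' in s for s in keyWords):
--             msg_gen_catList[3].append(keyWords)
--         elif any ('applicationcachenotificationlistener' in s for s in keyWords):
--             msg_gen_catList[4].append(keyWords)
--         else:
--             msg_gen_catList[5].append(keyWords)
--     return(msg_gen_catList)
-- ===== SOURCE B (Python) =====
-- _CATEGORIES = [
--     'provisioningentitlementhelper',
--     'baseruntimeentitlementhelper',
--     'messagingexceptionmapper',
--     'messagingserviceexception',
--     'applicationcachenotificationlistener',
-- ]
--
-- def _bucket(keyWords):
--     i = 0
--     for c in _CATEGORIES: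
--         if any(c in s for s in keyWords):
--             return i
--         i += 1
--     return 5
--
-- def getmsg_gen_Lists(msg_gen_KeyWords):
--     return [[g for g in msg_gen_KeyWords if _bucket(g) == i] for i in range(6)]
-- ===== Notes on version B (the rewrite author's own statement) =====
-- stated objective: simpler
-- what changed: Replaces the five-branch elif cascade with mutable bucket appends by a data-driven first-match bucket index over a category table plus six independent filters of the input.
import Mathlib
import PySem

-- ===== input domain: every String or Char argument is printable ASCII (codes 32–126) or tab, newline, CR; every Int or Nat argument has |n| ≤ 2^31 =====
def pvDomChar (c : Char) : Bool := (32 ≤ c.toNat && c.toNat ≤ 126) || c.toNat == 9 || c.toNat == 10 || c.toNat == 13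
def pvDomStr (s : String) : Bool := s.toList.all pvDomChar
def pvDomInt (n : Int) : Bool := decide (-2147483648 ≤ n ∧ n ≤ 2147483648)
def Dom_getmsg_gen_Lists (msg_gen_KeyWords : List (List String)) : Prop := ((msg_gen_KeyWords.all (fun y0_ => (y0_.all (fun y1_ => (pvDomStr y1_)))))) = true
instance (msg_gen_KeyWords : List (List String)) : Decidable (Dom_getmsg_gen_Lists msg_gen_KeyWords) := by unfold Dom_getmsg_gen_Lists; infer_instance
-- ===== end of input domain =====

-- B replaces A's five-branch elif cascade (mutating six buckets) by a first-match bucket index over a category table plus six filters; objective: simpler.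


-- ===== PORT A =====
-- any (cat in s for s in keyWords)
def pvAnyIn (cat : String) (keyWords : List String) : Bool :=
  keyWords.any (fun s => PySem.Str.isIn cat s)

-- six-bucket state as a 6-tuple of lists; appending to catList[i] is appending to the i-th component
def pvCat6 : Type := List (List String) × List (List String) × List (List String) × List (List String) × List (List String) × List (List String)

-- the body of A's for-loop: the elif cascade, appending keyWords to the matching bucket
def pvStepA (cat : pvCat6) (keyWords : List String) : pvCat6 :=
  if pvAnyIn "provisioningentitlementhelper" keyWords then
    (cat.1 ++ [keyWords], cat.2.1, cat.2.2.1, cat.2.2.2.1, cat.2.2.2.2.1, cat.2.2.2.2.2)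
  else if pvAnyIn "baseruntimeentitlementhelper" keyWords then
    (cat.1, cat.2.1 ++ [keyWords], cat.2.2.1, cat.2.2.2.1, cat.2.2.2.2.1, cat.2.2.2.2.2)
  else if pvAnyIn "messagingexceptionmapper" keyWords then
    (cat.1, cat.2.1, cat.2.2.1 ++ [keyWords], cat.2.2.2.1, cat.2.2.2.2.1, cat.2.2.2.2.2)
  else if pvAnyIn "messagingserviceexception" keyWords then
    (cat.1, cat.2.1, cat.2.2.1, cat.2.2.2.1 ++ [keyWords], cat.2.2.2.2.1, cat.2.2.2.2.2)
  else if pvAnyIn "applicationcachenotificationlistener" keyWords then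
    (cat.1, cat.2.1, cat.2.2.1, cat.2.2.2.1, cat.2.2.2.2.1 ++ [keyWords], cat.2.2.2.2.2)
  else
    (cat.1, cat.2.1, cat.2.2.1, cat.2.2.2.1, cat.2.2.2.2.1, cat.2.2.2.2.2 ++ [keyWords])

def getmsg_gen_Lists (msg_gen_KeyWords : List (List String)) : List (List (List String)) :=
  let r := msg_gen_KeyWords.foldl pvStepA (([], [], [], [], [], []) : pvCat6)
  [r.1, r.2.1, r.2.2.1, r.2.2.2.1, r.2.2.2.2.1, r.2.2.2.2.2]

-- ===== PORT B =====
def pvCategories : List String :=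
  ["provisioningentitlementhelper", "baseruntimeentitlementhelper", "messagingexceptionmapper",
   "messagingserviceexception", "applicationcachenotificationlistener"]

-- the for-loop of _bucket: walk the table with a counter, return on first match, 5 after the loop
def pvBucketGo (cats : List String) (i : Nat) (keyWords : List String) : Nat :=
  match cats with
  | [] => 5
  | c :: cs => if pvAnyIn c keyWords then i else pvBucketGo cs (i + 1) keyWords

def pvBucket (keyWords : List String) : Nat := pvBucketGo pvCategories 0 keyWords

def getmsg_gen_Lists_alt (msg_gen_KeyWords : List (List String)) : List (List (List String)) :=
  (List.range 6).map (fun i => msg_gen_KeyWords.filter (fun g => pvBucket g == i))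

-- ===== PRECONDITION & SPEC =====
def Spec_getmsg_gen_Lists (msg_gen_KeyWords : List (List String)) (out : List (List (List String))) : Prop := out = getmsg_gen_Lists_alt msg_gen_KeyWords
instance (msg_gen_KeyWords : List (List String)) (out : List (List (List String))) : Decidable (Spec_getmsg_gen_Lists msg_gen_KeyWords out) := by unfold Spec_getmsg_gen_Lists; infer_instance

-- ===== CLAIM (what is proved, stated in full; the proofs are below) =====
def Claim_equal_getmsg_gen_Lists : Prop := ∀ (msg_gen_KeyWords : List (List String)), Dom_getmsg_gen_Lists msg_gen_KeyWords → Spec_getmsg_gen_Lists msg_gen_KeyWords (getmsg_gen_Lists msg_gen_KeyWords)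

-- ===== LEMMAS AND PROOFS =====

-- pvBucket as the nested-if cascade A uses
theorem pvBucket_eq (kw : List String) :
    pvBucket kw =
      if pvAnyIn "provisioningentitlementhelper" kw then 0
      else if pvAnyIn "baseruntimeentitlementhelper" kw then 1
      else if pvAnyIn "messagingexceptionmapper" kw then 2
      else if pvAnyIn "messagingserviceexception" kw then 3
      else if pvAnyIn "applicationcachenotificationlistener" kw then 4
      else 5 := by
  simp [pvBucket, pvCategories, pvBucketGo]

-- loop invariant: the fold from any six-list state appends, componentwise, the bucket-i filters
theorem foldl_inv (xs : List (List String)) (a b c d e f : List (List String)) :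
    xs.foldl pvStepA ((a, b, c, d, e, f) : pvCat6)
    = (a ++ xs.filter (fun g => pvBucket g == 0),
       b ++ xs.filter (fun g => pvBucket g == 1),
       c ++ xs.filter (fun g => pvBucket g == 2),
       d ++ xs.filter (fun g => pvBucket g == 3),
       e ++ xs.filter (fun g => pvBucket g == 4),
       f ++ xs.filter (fun g => pvBucket g == 5)) := by
  induction xs generalizing a b c d e f with
  | nil => simp only [List.foldl_nil, List.filter_nil, List.append_nil]
  | cons kw t ih =>
    simp only [List.foldl_cons, pvStepA]
    by_cases h1 : pvAnyIn "provisioningentitlementhelper" kw = true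
    · simp [h1, ih, pvBucket_eq kw]
    · by_cases h2 : pvAnyIn "baseruntimeentitlementhelper" kw = true
      · simp [h1, h2, ih, pvBucket_eq kw]
      · by_cases h3 : pvAnyIn "messagingexceptionmapper" kw = true
        · simp [h1, h2, h3, ih, pvBucket_eq kw]
        · by_cases h4 : pvAnyIn "messagingserviceexception" kw = true
          · simp [h1, h2, h3, h4, ih, pvBucket_eq kw]
          · by_cases h5 : pvAnyIn "applicationcachenotificationlistener" kw = true
            · simp [h1, h2, h3, h4, h5, ih, pvBucket_eq kw]
            · simp [h1, h2, h3, h4, h5, ih, pvBucket_eq kw]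

-- ===== VERDICT (by name: the statement is the Claim_ definition above) =====
theorem getmsg_gen_Lists_spec : Claim_equal_getmsg_gen_Lists := by
  intro xs _
  show _ = _
  simp only [getmsg_gen_Lists, getmsg_gen_Lists_alt, foldl_inv]
  simp [List.range_succ]
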